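-- pv_equiv track=rewrite | github.com/A-Korotin/algorithms_and_data_structures | 1 semester/lab1/lab1_2.py | insertion_sort_with_indices
-- ===== SOURCE A (Python) =====
-- from typing import List, Tuple
--
-- def insertion_sort_with_indices(inp: List[int]) -> Tuple[List[int], List[int]]:
--     arr = inp.copy()
--     indices = {}
--     for j in range(0, len(arr)):
--         tmp = arr[j]
--         i = j - 1
--         while i >= 0 and arr[i] > tmp:
--             arr[i + 1] = arr[i]
--             i -= 1
--         indices[tmp] = i + 2
--         arr[i + 1] = tmp
--
--     return arr, [indices[i] for i in inp]
-- ===== SOURCE B (Python) =====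
-- from typing import List, Tuple
--
-- def insertion_sort_with_indices(inp: List[int]) -> Tuple[List[int], List[int]]:
--     ranks = {}
--     for j, v in enumerate(inp):
--         ranks[v] = 1 + sum(1 for x in inp[:j] if x <= v)
--     return sorted(inp), [ranks[v] for v in inp]
-- ===== Notes on version B (the rewrite author's own statement) =====
-- stated objective: alternative
-- what changed: B replaces the in-place shifting insertion sort with sorted() for the array and, for each position, a direct prefix count (#earlier elements <= value, plus 1) written into a dict keyed by value; no per-element shifting writes.
import Mathlib
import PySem

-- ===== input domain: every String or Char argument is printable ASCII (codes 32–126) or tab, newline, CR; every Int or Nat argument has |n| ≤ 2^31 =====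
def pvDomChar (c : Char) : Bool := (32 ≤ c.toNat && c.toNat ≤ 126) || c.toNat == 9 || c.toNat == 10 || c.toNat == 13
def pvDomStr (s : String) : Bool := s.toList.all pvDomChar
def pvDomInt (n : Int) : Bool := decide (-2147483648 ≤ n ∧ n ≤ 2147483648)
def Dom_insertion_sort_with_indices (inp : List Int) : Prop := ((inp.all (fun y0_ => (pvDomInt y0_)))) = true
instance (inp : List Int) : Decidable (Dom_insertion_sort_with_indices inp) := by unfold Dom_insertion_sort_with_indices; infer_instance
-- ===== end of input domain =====

-- B computes the sorted array with sorted() and each value's insertion rank by a direct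
-- prefix count instead of A's in-place shifting insertion sort (objective: alternative).


-- ===== PORT A =====
-- the while loop: argument k is Python's i+1; reads arr[i] and writes arr[i+1] are always
-- in range here (0 ≤ i, i+1 ≤ j < len arr), so List.getD/List.set are exact
def pvInnerA (arr : List Int) (tmp : Int) : Nat → List Int × Nat
  | 0 => (arr, 0)
  | Nat.succ i => if arr.getD i 0 > tmp then pvInnerA (arr.set (i + 1) (arr.getD i 0)) tmp i else (arr, i + 1)

-- one iteration of 'for j in range(0, len(arr))' on the state (arr, indices)
def pvStepA (st : List Int × PySem.Dict Int Int) (j : Nat) : List Int × PySem.Dict Int Int :=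
  let tmp := st.1.getD j 0            -- arr[j], j < len arr: exact
  let r := pvInnerA st.1 tmp j        -- while loop, i starts at j-1; r.2 = i+1 at exit
  (r.1.set r.2 tmp, st.2.insert tmp ((r.2 : Int) + 1))   -- arr[i+1] = tmp; indices[tmp] = i+2

def insertion_sort_with_indices (inp : List Int) : List Int × List Int :=
  -- range(0, len(arr)) = List.range inp.length (exact)
  let res := (List.range inp.length).foldl pvStepA (inp, PySem.Dict.empty)
  -- indices[i]: every element of inp is a key of the dict, so KeyError never occurs; getD is exact
  (res.1, inp.map (fun v => res.2.getD v 0))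

-- ===== PORT B =====
-- sum(1 for x in inp[:j] if x <= v) is the count of elements ≤ v among the first j
-- (inp[:j] with 0 ≤ j is List.take; the 0/1-sum is countP), j from enumerate so j ≥ 0
def pvStepB (inp : List Int) (d : PySem.Dict Int Int) (jv : Int × Int) : PySem.Dict Int Int :=
  d.insert jv.2 (1 + (((inp.take jv.1.toNat).countP (fun x => decide (x ≤ jv.2)) : Int)))

def insertion_sort_with_indices_alt (inp : List Int) : List Int × List Int :=
  let ranks := (PySem.List.enumerate inp).foldl (pvStepB inp) PySem.Dict.empty
  -- ranks[v]: every element of inp is a key, so getD is exact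
  (PySem.List.sorted inp (fun x => x) false, inp.map (fun v => ranks.getD v 0))

-- ===== PRECONDITION & SPEC =====
def Spec_insertion_sort_with_indices (inp : List Int) (out : List Int × List Int) : Prop := out = insertion_sort_with_indices_alt inp
instance (inp : List Int) (out : List Int × List Int) : Decidable (Spec_insertion_sort_with_indices inp out) := by unfold Spec_insertion_sort_with_indices; infer_instance

-- ===== CLAIM (what is proved, stated in full; the proofs are below) =====
def Claim_equal_insertion_sort_with_indices : Prop := ∀ (inp : List Int), Dom_insertion_sort_with_indices inp → Spec_insertion_sort_with_indices inp (insertion_sort_with_indices inp)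

-- ===== LEMMAS AND PROOFS =====

-- the while loop followed by 'arr[i+1] = tmp' on a sorted prefix inserts tmp after the
-- countP (· ≤ tmp) elements that are ≤ tmp, consuming the first suffix slot
theorem pvInnerA_spec (pre : List Int) (tmp : Int) (h : pre.Pairwise (· ≤ ·)) :
    ∀ (s0 : Int) (srest : List Int),
    (pvInnerA (pre ++ s0 :: srest) tmp pre.length).2 = pre.countP (fun x => decide (x ≤ tmp)) ∧
    (pvInnerA (pre ++ s0 :: srest) tmp pre.length).1.set
        (pvInnerA (pre ++ s0 :: srest) tmp pre.length).2 tmp =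
      pre.take (pre.countP (fun x => decide (x ≤ tmp))) ++
        tmp :: (pre.drop (pre.countP (fun x => decide (x ≤ tmp))) ++ srest) := by
  induction pre using List.reverseRecOn with
  | nil => intro s0 srest; simp [pvInnerA]
  | append_singleton qre b ih =>
    intro s0 srest
    have hq : qre.Pairwise (· ≤ ·) := (List.pairwise_append.mp h).1
    have hqb : ∀ x ∈ qre, x ≤ b := by
      intro x hx
      exact (List.pairwise_append.mp h).2.2 x hx b (List.mem_singleton_self b)
    have harr : (qre ++ [b] ++ s0 :: srest) = qre ++ b :: s0 :: srest := by simp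
    have hlen : (qre ++ [b]).length = qre.length + 1 := by simp
    rw [harr, hlen]
    have hget : (qre ++ b :: s0 :: srest).getD qre.length 0 = b := by
      simp [List.getD]
    by_cases hb : b > tmp
    · have hset : (qre ++ b :: s0 :: srest).set (qre.length + 1) b = qre ++ b :: b :: srest := by
        rw [List.set_append_right _ _ (by omega)]
        simp
      simp only [pvInnerA, hget, hb, if_pos, hset]
      have := ih hq b (b :: srest)
      have hcnt : (qre ++ [b]).countP (fun x => decide (x ≤ tmp)) = qre.countP (fun x => decide (x ≤ tmp)) := by
        simp [List.countP_append]; omega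
      have hple : qre.countP (fun x => decide (x ≤ tmp)) ≤ qre.length := List.countP_le_length
      rw [hcnt]
      refine ⟨this.1, ?_⟩
      rw [this.2]
      rw [List.take_append_of_le_length hple, List.drop_append_of_le_length hple]
      simp
    · have hble : b ≤ tmp := by omega
      simp only [pvInnerA, hget, hb, if_false]
      have hcnt : (qre ++ [b]).countP (fun x => decide (x ≤ tmp)) = qre.length + 1 := by
        rw [List.countP_eq_length.mpr]
        · simp
        · intro x hx
          simp only [List.mem_append, List.mem_singleton] at hx
          rcases hx with hx | rfl
          · exact decide_eq_true (le_trans (hqb x hx) hble)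
          · exact decide_eq_true hble
      constructor
      · simpa using hcnt.symm
      · rw [hcnt]
        have : (qre ++ b :: s0 :: srest).set (qre.length + 1) tmp = qre ++ b :: tmp :: srest := by
          rw [List.set_append_right _ _ (by omega)]
          simp
        rw [this]
        rw [List.take_of_length_le (by simp), List.drop_of_length_le (by simp)]
        simp

-- inserting tmp at position countP (· ≤ tmp) keeps the list sorted
theorem pvInsert_pairwise (P : List Int) (tmp : Int) (h : P.Pairwise (· ≤ ·)) :
    (P.take (P.countP (fun x => decide (x ≤ tmp))) ++
      tmp :: P.drop (P.countP (fun x => decide (x ≤ tmp)))).Pairwise (· ≤ ·) := by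
  induction P with
  | nil => simp
  | cons a P' ih =>
    have ha : ∀ x ∈ P', a ≤ x := (List.pairwise_cons.mp h).1
    have hp' : P'.Pairwise (· ≤ ·) := (List.pairwise_cons.mp h).2
    by_cases hat : a ≤ tmp
    · have hc : (a :: P').countP (fun x => decide (x ≤ tmp)) =
          P'.countP (fun x => decide (x ≤ tmp)) + 1 := by
        simp [hat]
      rw [hc]
      simp only [List.take_succ_cons, List.drop_succ_cons, List.cons_append]
      refine List.pairwise_cons.mpr ⟨?_, ih hp'⟩
      intro y hy
      have hperm : (P'.take (P'.countP (fun x => decide (x ≤ tmp))) ++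
          tmp :: P'.drop (P'.countP (fun x => decide (x ≤ tmp)))).Perm (tmp :: P') := by
        have := List.perm_middle (a := tmp)
          (l₁ := P'.take (P'.countP (fun x => decide (x ≤ tmp))))
          (l₂ := P'.drop (P'.countP (fun x => decide (x ≤ tmp))))
        simpa [List.take_append_drop] using this
      have hy' : y ∈ tmp :: P' := hperm.mem_iff.mp hy
      rcases List.mem_cons.mp hy' with rfl | hy'
      · exact hat
      · exact ha y hy'
    · have htlt : tmp < a := by omega
      have hc : (a :: P').countP (fun x => decide (x ≤ tmp)) = 0 := by
        rw [List.countP_eq_zero]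
        intro x hx
        rcases List.mem_cons.mp hx with rfl | hx
        · simpa using hat
        · have := ha x hx; simp; omega
      rw [hc]
      simp only [List.take_zero, List.drop_zero, List.nil_append]
      refine List.pairwise_cons.mpr ⟨?_, h⟩
      intro y hy
      rcases List.mem_cons.mp hy with rfl | hy
      · omega
      · have := ha y hy; omega

-- main invariant of A's outer loop: a sorted permutation P of the already-processed
-- prefix c, and the dict equal to B's fold over the remaining enumerated suffix
theorem pvOuter_spec (suf : List Int) : ∀ (P c : List Int) (d : PySem.Dict Int Int),
    P.Pairwise (· ≤ ·) → P.Perm c →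
    (List.range' c.length suf.length 1).foldl pvStepA (P ++ suf, d) =
      (PySem.List.sorted (c ++ suf) (fun x => x) false,
       (PySem.List.enumerate suf (c.length : Int)).foldl (pvStepB (c ++ suf)) d) := by
  induction suf with
  | nil =>
    intro P c d hp hperm
    simp only [List.length_nil, List.range'_zero, List.foldl_nil, List.append_nil,
      PySem.List.enumerate_nil]
    rw [PySem.List.sorted_id_eq_of_perm_of_pairwise c P hperm hp]
  | cons tmp suf' ih =>
    intro P c d hp hperm
    have hlen : P.length = c.length := hperm.length_eq
    set p := P.countP (fun x => decide (x ≤ tmp)) with hpdef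
    have hspec := pvInnerA_spec P tmp hp tmp suf'
    have hstep : pvStepA (P ++ tmp :: suf', d) c.length =
        ((P.take p ++ tmp :: P.drop p) ++ suf', d.insert tmp ((p : Int) + 1)) := by
      unfold pvStepA
      have hget : (P ++ tmp :: suf').getD P.length 0 = tmp := by
        simp [List.getD]
      rw [← hlen]
      simp only [hget]
      rw [hspec.2, hspec.1]
      simp [hpdef, List.append_assoc]
    have hP' : (P.take p ++ tmp :: P.drop p).Pairwise (· ≤ ·) := pvInsert_pairwise P tmp hp
    have hperm' : (P.take p ++ tmp :: P.drop p).Perm (c ++ [tmp]) := by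
      have h1 : (P.take p ++ tmp :: P.drop p).Perm (tmp :: P) := by
        simpa [List.take_append_drop] using
          List.perm_middle (a := tmp) (l₁ := P.take p) (l₂ := P.drop p)
      exact h1.trans ((hperm.cons tmp).trans (List.perm_append_singleton tmp c).symm)
    have hcP : c.countP (fun x => decide (x ≤ tmp)) = p := (hperm.countP_eq _).symm
    have hih := ih (P.take p ++ tmp :: P.drop p) (c ++ [tmp]) (d.insert tmp ((p : Int) + 1)) hP' hperm'
    simp only [List.length_cons, List.range'_succ, List.foldl_cons, hstep]
    simp only [List.length_append, List.length_cons, List.length_nil] at hih ⊢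
    rw [hih]
    have hL : (c ++ [tmp]) ++ suf' = c ++ tmp :: suf' := by simp
    rw [hL]
    simp only [PySem.List.enumerate_cons, List.foldl_cons]
    have hstepB : pvStepB (c ++ tmp :: suf') d ((c.length : Int), tmp) = d.insert tmp ((p : Int) + 1) := by
      unfold pvStepB
      simp only [Int.toNat_natCast, List.take_left]
      rw [hcP, add_comm]
    rw [hstepB]
    norm_num

-- ===== VERDICT (by name: the statement is the Claim_ definition above) =====
theorem insertion_sort_with_indices_spec : Claim_equal_insertion_sort_with_indices := by
  intro inp _
  unfold Spec_insertion_sort_with_indices insertion_sort_with_indices insertion_sort_with_indices_alt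
  have h := pvOuter_spec inp [] [] PySem.Dict.empty (List.Pairwise.nil) (List.Perm.refl [])
  simp only [List.nil_append, List.length_nil, Nat.cast_zero] at h
  rw [List.range_eq_range', h]
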